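-- pv_equiv track=rewrite | github.com/Sergryap/regexp_netology | reg.py | merging_duplicates
-- ===== SOURCE A (Python) =====
-- def merging_duplicates(book_csv: list):
-- 	"""Слияние дубликатов записей"""
-- 	count_ind = {}
-- 	for i, rew in enumerate(book_csv[1:], start=1):
-- 		# составляем словарь {фамилия: [список из индексов с повторяющимися фамилиями]}
-- 		count_ind[book_csv[i][0]] = count_ind.get(book_csv[i][0], []) + [i]
-- 	# создаем новый список без дублей:
-- 	book_csv_new = [book_csv[0]].copy()
--
-- 	for ind in count_ind.values():
-- 		if len(ind) > 1:
-- 			for n, i in enumerate(ind):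
-- 				if n == 0:
-- 					s = book_csv[i].copy()
-- 				else:
-- 					for j in range(len(book_csv[0])):
-- 						if not s[j]:
-- 							# заменяем пустые значения:
-- 							s[j] = book_csv[i][j]
-- 		else:
-- 			s = book_csv[ind[0]].copy()
-- 		book_csv_new.append(s)
-- 	return book_csv_new
-- ===== SOURCE B (Python) =====
-- def merging_duplicates(book_csv: list):
-- 	"""Слияние дубликатов записей"""
-- 	header = book_csv[0]
-- 	merged = {}
-- 	for row in book_csv[1:]:
-- 		key = row[0]
-- 		if key in merged:
-- 			m = merged[key]
-- 			for j in range(len(header)):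
-- 				if not m[j]:
-- 					m[j] = row[j]
-- 		else:
-- 			merged[key] = row.copy()
-- 	return [header] + list(merged.values())
-- ===== Notes on version B (the rewrite author's own statement) =====
-- stated objective: simpler
-- what changed: A's two-pass scheme (first pass builds a surname->index-list dict, second pass re-reads book_csv to merge each index group) is replaced by a single pass over the rows that maintains the merged row per surname directly in a dict, returning [header] + merged values in first-appearance order.
import Mathlib
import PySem

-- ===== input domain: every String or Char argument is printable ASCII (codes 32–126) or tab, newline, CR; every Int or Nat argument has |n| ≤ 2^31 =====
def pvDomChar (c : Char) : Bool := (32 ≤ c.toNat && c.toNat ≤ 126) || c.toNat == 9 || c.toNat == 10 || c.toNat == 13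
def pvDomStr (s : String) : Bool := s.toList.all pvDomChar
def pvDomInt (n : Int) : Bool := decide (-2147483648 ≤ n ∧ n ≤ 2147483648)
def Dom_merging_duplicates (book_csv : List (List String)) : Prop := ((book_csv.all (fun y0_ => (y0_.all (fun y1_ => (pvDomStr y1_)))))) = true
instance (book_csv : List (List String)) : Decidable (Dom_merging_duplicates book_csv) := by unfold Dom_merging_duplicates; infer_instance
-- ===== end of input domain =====

-- B replaces A's two-pass scheme (index-grouping dict, then a merge pass over each index group)
-- with ONE pass that maintains the merged row per surname directly; objective: simpler (return value
-- equivalence; neither version mutates its argument).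


-- ===== PORT A =====
-- the inner loop 'for j in range(len(book_csv[0])): if not s[j]: s[j] = r[j]' — identical statement
-- in both Pythons, so shared by both ports
def fillEmpty (n : Int) (s r : List String) : List String :=
  (PySem.List.pyRange 0 n 1).foldl
    (fun s j => if PySem.List.pyGetD s j "" = "" then PySem.List.pySetD s j (PySem.List.pyGetD r j "") else s) s

def merging_duplicates (book_csv : List (List String)) : List (List String) :=
  let count_ind : PySem.Dict String (List Int) :=
    (PySem.List.enumerate (PySem.List.slice book_csv (some 1) none) 1).foldl
      (fun d p =>
        let key := PySem.List.pyGetD (PySem.List.pyGetD book_csv p.1 []) 0 ""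
        d.insert key (d.getD key [] ++ [p.1]))
      PySem.Dict.empty
  let hlen : Int := (PySem.List.pyGetD book_csv 0 []).length
  count_ind.values.foldl
    (fun acc ind =>
      let s : List String :=
        if ind.length > 1 then
          (PySem.List.enumerate ind 0).foldl
            (fun s q =>
              if q.1 = 0 then PySem.List.pyGetD book_csv q.2 []
              else fillEmpty hlen s (PySem.List.pyGetD book_csv q.2 []))
            []
        else PySem.List.pyGetD book_csv (PySem.List.pyGetD ind 0 0) []
      acc ++ [s])
    [PySem.List.pyGetD book_csv 0 []]

-- ===== PORT B =====
def merging_duplicates_alt (book_csv : List (List String)) : List (List String) :=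
  let header := PySem.List.pyGetD book_csv 0 []
  let merged : PySem.Dict String (List String) :=
    (PySem.List.slice book_csv (some 1) none).foldl
      (fun d row =>
        let key := PySem.List.pyGetD row 0 ""
        if d.contains key then d.modify key [] (fun m => fillEmpty (header.length : Int) m row)
        else d.insert key row)
      PySem.Dict.empty
  header :: merged.values

-- ===== PRECONDITION & SPEC =====
-- Pre_ excludes the inputs where A raises IndexError (empty book_csv; an empty data row; a row of a
-- duplicated surname shorter than the header); it is slightly narrower than that: a short row of a
-- duplicated surname escapes the IndexError when every field it would fill is already non-empty, and
-- such ragged rows are excluded too — CSV rows of a merged group are header-length.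
def Pre_merging_duplicates (book_csv : List (List String)) : Prop :=
  book_csv ≠ [] ∧ ∀ row ∈ book_csv.tail, row ≠ [] ∧
    (2 ≤ book_csv.tail.countP (fun r => r.headI == row.headI) → book_csv.headI.length ≤ row.length)
instance (book_csv : List (List String)) : Decidable (Pre_merging_duplicates book_csv) := by
  unfold Pre_merging_duplicates; infer_instance

def pvWitness_merging_duplicates : List (List String) :=
  [["name", "phone"], ["ivanov", "123"], ["ivanov", ""], ["petrov", "9"]]

def Spec_merging_duplicates (book_csv : List (List String)) (out : List (List String)) : Prop := out = merging_duplicates_alt book_csv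
instance (book_csv : List (List String)) (out : List (List String)) : Decidable (Spec_merging_duplicates book_csv out) := by unfold Spec_merging_duplicates; infer_instance

-- ===== CLAIM (what is proved, stated in full; the proofs are below) =====
def Claim_equal_merging_duplicates : Prop := ∀ (book_csv : List (List String)), Dom_merging_duplicates book_csv → Pre_merging_duplicates book_csv → Spec_merging_duplicates book_csv (merging_duplicates book_csv)

-- ===== LEMMAS AND PROOFS =====

-- row of book_csv at (Python) index i
def rowAt (bc : List (List String)) (i : Int) : List String := PySem.List.pyGetD bc i []

-- the merged row of one surname group, given the group's row indices in order
def gmerge (bc : List (List String)) (n : Int) : List Int → List String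
  | [] => []
  | i :: rs => rs.foldl (fun s i => fillEmpty n s (rowAt bc i)) (rowAt bc i)

-- enumerate(xs, s) pairs index s+j with ys[s+j] when xs = ys.drop s
lemma enum_getD {α : Type} (ys : List α) (dflt : α) :
    ∀ (xs : List α) (s : Nat), ys.drop s = xs →
      ∀ p ∈ PySem.List.enumerate xs (s : Int), PySem.List.pyGetD ys p.1 dflt = p.2 := by
  intro xs
  induction xs with
  | nil => intro s _ p hp; simp [PySem.List.enumerate] at hp
  | cons x xs ih =>
    intro s hdrop p hp
    rw [PySem.List.enumerate_cons] at hp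
    rcases List.mem_cons.mp hp with hp | hp
    · subst hp
      simp only [PySem.List.pyGetD_natCast]
      have h0 : (ys.drop s)[0]? = some x := by rw [hdrop]; rfl
      rw [List.getElem?_drop] at h0
      simp only [Nat.add_zero] at h0
      simp [List.getD_eq_getElem?_getD, h0]
    · have h1 : ((s : Int) + 1) = ((s + 1 : Nat) : Int) := by push_cast; ring
      rw [h1] at hp
      exact ih (s + 1) (by rw [← List.drop_drop, hdrop]; rfl) p hp

-- fsts produced by enumerate from a start ≥ 1 are never 0, so A's 'n == 0' branch fires only first
lemma enum_fold_ne_zero {β : Type} (g : Int → β) (h : β → Int → β) :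
    ∀ (xs : List Int) (t : Nat) (s : β), 1 ≤ t →
      (PySem.List.enumerate xs (t : Int)).foldl
          (fun s q => if q.1 = 0 then g q.2 else h s q.2) s
        = xs.foldl h s := by
  intro xs
  induction xs with
  | nil => intro t s _; simp [PySem.List.enumerate]
  | cons x xs ih =>
    intro t s ht
    rw [PySem.List.enumerate_cons]
    simp only [List.foldl_cons]
    have hne : ¬ ((t : Int) = 0) := by omega
    rw [if_neg hne]
    have h1 : ((t : Int) + 1) = ((t + 1 : Nat) : Int) := by push_cast; ring
    rw [h1]
    exact ih (t + 1) (h s x) (by omega)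

-- A's per-group computation equals gmerge on any nonempty index list
lemma bigif_eq_gmerge (bc : List (List String)) (n : Int) (ind : List Int) (hne : ind ≠ []) :
    (if ind.length > 1 then
        (PySem.List.enumerate ind 0).foldl
          (fun s q =>
            if q.1 = 0 then PySem.List.pyGetD bc q.2 []
            else fillEmpty n s (PySem.List.pyGetD bc q.2 []))
          []
      else PySem.List.pyGetD bc (PySem.List.pyGetD ind 0 0) [])
    = gmerge bc n ind := by
  match ind with
  | [] => exact absurd rfl hne
  | [i] => simp [gmerge, rowAt, PySem.List.pyGetD_zero_cons]
  | i :: j :: rs =>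
    have hlen : (i :: j :: rs).length > 1 := by simp
    rw [if_pos hlen, PySem.List.enumerate_cons]
    simp only [List.foldl_cons, reduceIte]
    have h1 : (0 : Int) + 1 = ((1 : Nat) : Int) := by norm_num
    rw [h1]
    refine (enum_fold_ne_zero (fun i => PySem.List.pyGetD bc i [])
      (fun s i => fillEmpty n s (PySem.List.pyGetD bc i [])) (j :: rs) 1
      (PySem.List.pyGetD bc i []) (by omega)).trans ?_
    rfl

-- master invariant: running A's index-grouping fold and B's direct-merge fold in step preserves
-- equal key lists and 'B's row = gmerge of A's index list' at every contained key
lemma master (bc : List (List String)) (n : Int) :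
    ∀ (P : List (Int × List String)),
      (∀ p ∈ P, PySem.List.pyGetD bc p.1 [] = p.2) →
      ∀ (dA : PySem.Dict String (List Int)) (dB : PySem.Dict String (List String)),
        dB.keys = dA.keys → dA.keys.Nodup →
        (∀ k, dA.contains k = true →
            dA.getD k [] ≠ [] ∧ dB.getD k [] = gmerge bc n (dA.getD k [])) →
        (let dA' := P.foldl (fun d p =>
            let key := PySem.List.pyGetD (PySem.List.pyGetD bc p.1 []) 0 ""
            d.insert key (d.getD key [] ++ [p.1])) dA
         let dB' := (P.map (·.2)).foldl (fun d row =>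
            let key := PySem.List.pyGetD row 0 ""
            if d.contains key then d.modify key [] (fun m => fillEmpty n m row)
            else d.insert key row) dB
         dB'.keys = dA'.keys ∧ dA'.keys.Nodup ∧
           ∀ k, dA'.contains k = true →
             dA'.getD k [] ≠ [] ∧ dB'.getD k [] = gmerge bc n (dA'.getD k [])) := by
  intro P
  induction P with
  | nil => intro _ dA dB hkeys hnd hval; exact ⟨hkeys, hnd, hval⟩
  | cons p P ih =>
    intro hP dA dB hkeys hnd hval
    simp only [List.map_cons, List.foldl_cons]
    have hrow : PySem.List.pyGetD bc p.1 [] = p.2 := hP p (by simp)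
    rw [hrow]
    set k0 := PySem.List.pyGetD p.2 0 "" with hk0
    have hcontains : dB.contains k0 = dA.contains k0 := by
      rw [PySem.Dict.contains_eq_decide_mem_keys, PySem.Dict.contains_eq_decide_mem_keys, hkeys]
    by_cases hc : dA.contains k0 = true
    · -- surname already seen: A appends the index, B merges the row in place
      rw [hcontains, if_pos hc]
      apply ih (fun q hq => hP q (by simp [hq]))
      · rw [PySem.Dict.keys_modify, PySem.Dict.keys_insert_of_contains _ _ (by rw [hcontains]; exact hc),
            PySem.Dict.keys_insert_of_contains _ _ hc, hkeys]
      · exact PySem.Dict.nodup_keys_insert _ _ _ hnd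
      · intro k hk
        by_cases hkk : k = k0
        · subst hkk
          obtain ⟨hne, hv⟩ := hval k0 hc
          rw [PySem.Dict.getD_insert_self, PySem.Dict.getD_modify_self, hv]
          refine ⟨by simp, ?_⟩
          match hold : dA.getD k0 [] with
          | [] => exact absurd hold hne
          | i0 :: rest =>
            simp only [gmerge, List.cons_append, List.foldl_append, List.foldl_cons, List.foldl_nil]
            rw [show rowAt bc p.1 = p.2 from hrow]
        · rw [PySem.Dict.getD_insert_of_ne _ _ _ hkk, PySem.Dict.getD_modify_of_ne _ _ _ hkk]
          apply hval k
          rw [PySem.Dict.contains_insert] at hk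
          simpa [hkk] using hk
    · -- first occurrence: A starts the index list, B stores the row
      have hc' : dA.contains k0 = false := by
        cases h : dA.contains k0 with
        | false => rfl
        | true => exact absurd h hc
      rw [hcontains, hc']
      simp only [Bool.false_eq_true, if_false]
      apply ih (fun q hq => hP q (by simp [hq]))
      · rw [PySem.Dict.keys_insert_of_not_contains _ _ hc',
            PySem.Dict.keys_insert_of_not_contains _ _ (by rw [hcontains]; exact hc'), hkeys]
      · exact PySem.Dict.nodup_keys_insert _ _ _ hnd
      · intro k hk
        by_cases hkk : k = k0
        · subst hkk
          rw [PySem.Dict.getD_insert_self, PySem.Dict.getD_insert_self,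
              PySem.Dict.getD_of_not_contains _ _ hc']
          refine ⟨by simp, ?_⟩
          simp [gmerge, rowAt, hrow]
        · rw [PySem.Dict.getD_insert_of_ne _ _ _ hkk, PySem.Dict.getD_insert_of_ne _ _ _ hkk]
          apply hval k
          rw [PySem.Dict.contains_insert] at hk
          simpa [hkk] using hk

-- ===== VERDICT (by name: the statement is the Claim_ definition above) =====
theorem merging_duplicates_spec : Claim_equal_merging_duplicates := by
  intro book_csv _ _
  unfold Spec_merging_duplicates
  simp only [merging_duplicates, merging_duplicates_alt]
  have hP : ∀ p ∈ PySem.List.enumerate (PySem.List.slice book_csv (some 1) none) 1,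
      PySem.List.pyGetD book_csv p.1 [] = p.2 := by
    have hdrop : book_csv.drop 1 = PySem.List.slice book_csv (some 1) none := by
      rw [PySem.List.slice_from_one, List.drop_one]
    exact fun p hp =>
      enum_getD book_csv [] (PySem.List.slice book_csv (some 1) none) 1 hdrop p (by simpa using hp)
  have hm := master book_csv ((PySem.List.pyGetD book_csv 0 []).length : Int)
      (PySem.List.enumerate (PySem.List.slice book_csv (some 1) none) 1) hP
      PySem.Dict.empty PySem.Dict.empty
      (by rw [PySem.Dict.keys_empty, PySem.Dict.keys_empty])
      (by rw [PySem.Dict.keys_empty]; exact List.nodup_nil)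
      (fun k hk => absurd hk (by simp [PySem.Dict.contains_empty]))
  rw [PySem.List.map_snd_enumerate] at hm
  simp only [] at hm
  obtain ⟨hkeys, hnd, hval⟩ := hm
  rw [PySem.List.foldl_append_singleton_eq_map]
  rw [PySem.Dict.values_eq_map_keys _ hnd ([] : List Int),
      PySem.Dict.values_eq_map_keys _ (hkeys ▸ hnd) ([] : List String), hkeys, List.map_map]
  simp only [List.singleton_append, List.cons.injEq, true_and]
  apply List.map_congr_left
  intro k hk
  have hc := (PySem.Dict.contains_iff_mem_keys _ k).2 hk
  obtain ⟨hne, hv⟩ := hval k hc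
  simp only [Function.comp]
  rw [bigif_eq_gmerge book_csv ((PySem.List.pyGetD book_csv 0 []).length : Int) _ hne]
  exact hv.symm
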